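-- pv_equiv track=rewrite | github.com/nmpluta/Python | Exercises/lab_1/listSum3.py | listSum3
-- ===== SOURCE A (Python) =====
-- def listSum3(list):
--     sum0 = 0
--     sum1 = 0
--     sum2 = 0
--     for i in range(0, len(list), 3):
--         sum0 += list[i]
--     for i in range(1, len(list), 3):
--         sum1 += list[i]
--     for i in range(2, len(list), 3):
--         sum2 += list[i]
--     return [sum0, sum1, sum2]
-- ===== SOURCE B (Python) =====
-- def listSum3(list):
--     sums = [0, 0, 0]
--     for i, x in enumerate(list):
--         sums[i % 3] += x
--     return sums
-- ===== Notes on version B (the rewrite author's own statement) =====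
-- stated objective: simpler
-- what changed: Replaces A's three separate strided loops (one per residue class of the index) by a single pass over the list that dispatches each element into a 3-slot accumulator list indexed by i % 3.
import Mathlib
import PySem

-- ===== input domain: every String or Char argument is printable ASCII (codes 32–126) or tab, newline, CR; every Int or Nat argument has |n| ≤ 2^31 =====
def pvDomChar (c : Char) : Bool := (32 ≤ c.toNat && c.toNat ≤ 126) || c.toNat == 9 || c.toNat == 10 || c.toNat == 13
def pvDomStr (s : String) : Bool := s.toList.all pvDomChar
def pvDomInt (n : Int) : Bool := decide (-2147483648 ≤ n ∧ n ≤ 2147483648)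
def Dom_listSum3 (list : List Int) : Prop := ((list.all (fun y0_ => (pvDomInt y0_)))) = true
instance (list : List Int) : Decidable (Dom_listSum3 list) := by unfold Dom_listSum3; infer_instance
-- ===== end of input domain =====

-- B replaces A's three strided index loops by one pass dispatching each element into a 3-slot accumulator by index mod 3 (simpler decomposition, same cost).


-- ===== PORT A =====
def listSum3 (list : List Int) : List Int :=
  let sum0 : Int :=
    (PySem.List.pyRange 0 (PySem.List.len list) 3).foldl
      (fun s i => s + PySem.List.pyGetD list i 0) 0
  let sum1 : Int :=
    (PySem.List.pyRange 1 (PySem.List.len list) 3).foldl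
      (fun s i => s + PySem.List.pyGetD list i 0) 0
  let sum2 : Int :=
    (PySem.List.pyRange 2 (PySem.List.len list) 3).foldl
      (fun s i => s + PySem.List.pyGetD list i 0) 0
  [sum0, sum1, sum2]

-- ===== PORT B =====
def listSum3_alt (list : List Int) : List Int :=
  (PySem.List.enumerate list 0).foldl
    (fun sums ix =>
      PySem.List.pySetD sums (PySem.Int.mod ix.1 3)
        (PySem.List.pyGetD sums (PySem.Int.mod ix.1 3) 0 + ix.2))
    [0, 0, 0]

-- ===== PRECONDITION & SPEC =====
def Spec_listSum3 (list : List Int) (out : List Int) : Prop := out = listSum3_alt list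
instance (list : List Int) (out : List Int) : Decidable (Spec_listSum3 list out) := by unfold Spec_listSum3; infer_instance

-- ===== CLAIM (what is proved, stated in full; the proofs are below) =====
def Claim_equal_listSum3 : Prop := ∀ (list : List Int), Dom_listSum3 list → Spec_listSum3 list (listSum3 list)

-- ===== LEMMAS AND PROOFS =====

-- sums of the elements whose index is ≡ 0, 1, 2 (mod 3), by one structural recursion:
-- prepending an element shifts every residue class up by one.
def tri : List Int → Int × Int × Int
  | [] => (0, 0, 0)
  | a :: t => ((tri t).2.2 + a, (tri t).1, (tri t).2.1)

-- A-side: the sum computed by one of A's strided loops, as a map-sum.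
def asum (k : Int) (l : List Int) : Int :=
  ((PySem.List.pyRange k (PySem.List.len l) 3).map (fun i => PySem.List.pyGetD l i 0)).sum

lemma pyGetD_cons_succ (x : Int) (xs : List Int) (i : Int) (h : 0 ≤ i) :
    PySem.List.pyGetD (x :: xs) (i + 1) 0 = PySem.List.pyGetD xs i 0 := by
  obtain ⟨m, rfl⟩ := Int.eq_ofNat_of_zero_le h
  have : ((m : Int) + 1) = ((m + 1 : Nat) : Int) := by push_cast; ring
  rw [this, PySem.List.pyGetD_natCast, PySem.List.pyGetD_natCast]
  simp [List.getD]

-- dropping the head of the list and lowering the start of a step-3 range by one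
lemma asum_shift (a : Int) (t : List Int) (k : Int) (hk : 0 ≤ k) :
    ((PySem.List.pyRange (k + 1) (PySem.List.len (a :: t)) 3).map
      (fun i => PySem.List.pyGetD (a :: t) i 0)).sum = asum k t := by
  unfold asum
  rw [PySem.List.pyRange_of_pos _ _ (by norm_num),
      PySem.List.pyRange_of_pos _ _ (by norm_num)]
  have hlen : PySem.List.len (a :: t) = PySem.List.len t + 1 := by
    simp [PySem.List.len]
  rw [hlen]
  have hcount : (if k + 1 < PySem.List.len t + 1 then
        ((PySem.List.len t + 1 - (k + 1) + 3 - 1) / 3).toNat else 0)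
      = (if k < PySem.List.len t then ((PySem.List.len t - k + 3 - 1) / 3).toNat else 0) := by
    by_cases h : k < PySem.List.len t
    · rw [if_pos (by omega), if_pos h]; congr 1; ring_nf
    · rw [if_neg (by omega), if_neg h]
  rw [hcount]
  rw [List.map_map, List.map_map]
  apply congrArg
  apply List.map_congr_left
  intro j _
  simp only [Function.comp]
  have : k + 1 + 3 * (j : Int) = (k + 3 * (j : Int)) + 1 := by ring
  rw [this, pyGetD_cons_succ _ _ _ (by positivity)]

-- the step-3 range starting at 0 of a nonempty list begins with index 0
lemma pyRange3_zero_cons (b : Int) (hb : 0 < b) :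
    PySem.List.pyRange 0 b 3 = 0 :: PySem.List.pyRange 3 b 3 := by
  rw [PySem.List.pyRange_of_pos _ _ (by norm_num : (0:Int) < 3),
      PySem.List.pyRange_of_pos _ _ (by norm_num : (0:Int) < 3)]
  have hcount : (if (0:Int) < b then ((b - 0 + 3 - 1) / 3).toNat else 0)
      = (if (3:Int) < b then ((b - 3 + 3 - 1) / 3).toNat else 0) + 1 := by
    rw [if_pos hb]
    by_cases h : (3:Int) < b
    · rw [if_pos h]; omega
    · rw [if_neg h]; omega
  rw [hcount, List.range_succ_eq_map, List.map_cons, List.map_map]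
  refine List.cons_eq_cons.mpr ⟨by norm_num, ?_⟩
  simp only [List.map_inj_left, Function.comp_apply]
  intro j hj
  push_cast
  ring

lemma asum_tri (l : List Int) : (asum 0 l, asum 1 l, asum 2 l) = tri l := by
  induction l with
  | nil => decide
  | cons a t ih =>
    have h0 : asum 0 (a :: t) = (tri t).2.2 + a := by
      unfold asum
      have hlen : PySem.List.len (a :: t) = (t.length : Int) + 1 := by
        simp [PySem.List.len]
      have hb : (0:Int) < PySem.List.len (a :: t) := by rw [hlen]; positivity
      rw [pyRange3_zero_cons _ hb, List.map_cons, List.sum_cons, hlen]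
      have hsh := asum_shift a t 2 (by norm_num)
      norm_num [hlen] at hsh
      rw [hsh]
      have h22 : asum 2 t = (tri t).2.2 := by
        have := congrArg (fun p => p.2.2) ih; simpa using this
      simp [PySem.List.pyGetD_zero_cons, h22]
      ring
    have h1 : asum 1 (a :: t) = (tri t).1 := by
      unfold asum
      have : (1:Int) = 0 + 1 := by norm_num
      rw [this, asum_shift a t 0 (by norm_num)]
      have := congrArg (fun p => p.1) ih; simpa using this
    have h2 : asum 2 (a :: t) = (tri t).2.1 := by
      unfold asum
      have : (2:Int) = 1 + 1 := by norm_num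
      rw [this, asum_shift a t 1 (by norm_num)]
      have := congrArg (fun p => p.2.1) ih; simpa using this
    show _ = tri (a :: t)
    unfold tri
    rw [h0, h1, h2]

-- one loop step of B at index s, by residue class of s
lemma step0 (a b c x : Int) (s : Nat) (h : s % 3 = 0) :
    PySem.List.pySetD [a, b, c] (PySem.Int.mod (s : Int) 3)
      (PySem.List.pyGetD [a, b, c] (PySem.Int.mod (s : Int) 3) 0 + x) = [a + x, b, c] := by
  have hmod : PySem.Int.mod (s : Int) 3 = 0 := by
    have := PySem.Int.mod_natCast s 3
    rw [h] at this
    exact_mod_cast this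
  rw [hmod]
  rfl

lemma step1 (a b c x : Int) (s : Nat) (h : s % 3 = 1) :
    PySem.List.pySetD [a, b, c] (PySem.Int.mod (s : Int) 3)
      (PySem.List.pyGetD [a, b, c] (PySem.Int.mod (s : Int) 3) 0 + x) = [a, b + x, c] := by
  have hmod : PySem.Int.mod (s : Int) 3 = 1 := by
    have := PySem.Int.mod_natCast s 3
    rw [h] at this
    exact_mod_cast this
  rw [hmod]
  rfl

lemma step2 (a b c x : Int) (s : Nat) (h : s % 3 = 2) :
    PySem.List.pySetD [a, b, c] (PySem.Int.mod (s : Int) 3)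
      (PySem.List.pyGetD [a, b, c] (PySem.Int.mod (s : Int) 3) 0 + x) = [a, b, c + x] := by
  have hmod : PySem.Int.mod (s : Int) 3 = 2 := by
    have := PySem.Int.mod_natCast s 3
    rw [h] at this
    exact_mod_cast this
  rw [hmod]
  rfl

-- B-side: one pass starting at index s fills the three slots, rotated by s % 3.
lemma alt_loop (t : List Int) (s : Nat) (a b c : Int) :
    (PySem.List.enumerate t (s : Int)).foldl
      (fun sums ix =>
        PySem.List.pySetD sums (PySem.Int.mod ix.1 3)
          (PySem.List.pyGetD sums (PySem.Int.mod ix.1 3) 0 + ix.2))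
      [a, b, c]
    = if s % 3 = 0 then [a + (tri t).1, b + (tri t).2.1, c + (tri t).2.2]
      else if s % 3 = 1 then [a + (tri t).2.2, b + (tri t).1, c + (tri t).2.1]
      else [a + (tri t).2.1, b + (tri t).2.2, c + (tri t).1] := by
  induction t generalizing s a b c with
  | nil =>
    simp only [PySem.List.enumerate, List.foldl_nil, tri]
    split_ifs <;> simp
  | cons x t ih =>
    rw [PySem.List.enumerate_cons, List.foldl_cons]
    have hs1 : ((s : Int) + 1) = ((s + 1 : Nat) : Int) := by push_cast; ring
    have h3 : s % 3 = 0 ∨ s % 3 = 1 ∨ s % 3 = 2 := by omega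
    rcases h3 with h | h | h
    · show List.foldl _ (PySem.List.pySetD [a, b, c] (PySem.Int.mod (s : Int) 3)
          (PySem.List.pyGetD [a, b, c] (PySem.Int.mod (s : Int) 3) 0 + x)) _ = _
      rw [step0 a b c x s h, hs1, ih]
      have hsucc : (s + 1) % 3 = 1 := by omega
      rw [hsucc, h]
      simp only [tri]
      norm_num
      ring
    · show List.foldl _ (PySem.List.pySetD [a, b, c] (PySem.Int.mod (s : Int) 3)
          (PySem.List.pyGetD [a, b, c] (PySem.Int.mod (s : Int) 3) 0 + x)) _ = _
      rw [step1 a b c x s h, hs1, ih]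
      have hsucc : (s + 1) % 3 = 2 := by omega
      rw [hsucc, h]
      simp only [tri]
      norm_num
      ring
    · show List.foldl _ (PySem.List.pySetD [a, b, c] (PySem.Int.mod (s : Int) 3)
          (PySem.List.pyGetD [a, b, c] (PySem.Int.mod (s : Int) 3) 0 + x)) _ = _
      rw [step2 a b c x s h, hs1, ih]
      have hsucc : (s + 1) % 3 = 0 := by omega
      rw [hsucc, h]
      simp only [tri]
      norm_num
      ring

-- ===== VERDICT (by name: the statement is the Claim_ definition above) =====
theorem listSum3_spec : Claim_equal_listSum3 := by
  intro l _
  unfold Spec_listSum3 listSum3 listSum3_alt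
  have hA0 : (PySem.List.pyRange 0 (PySem.List.len l) 3).foldl
      (fun s i => s + PySem.List.pyGetD l i 0) 0 = asum 0 l := by
    rw [PySem.List.foldl_add]; simp [asum]
  have hA1 : (PySem.List.pyRange 1 (PySem.List.len l) 3).foldl
      (fun s i => s + PySem.List.pyGetD l i 0) 0 = asum 1 l := by
    rw [PySem.List.foldl_add]; simp [asum]
  have hA2 : (PySem.List.pyRange 2 (PySem.List.len l) 3).foldl
      (fun s i => s + PySem.List.pyGetD l i 0) 0 = asum 2 l := by
    rw [PySem.List.foldl_add]; simp [asum]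
  have hB := alt_loop l 0 0 0 0
  norm_num at hB
  simp only [hA0, hA1, hA2]
  have := asum_tri l
  have e0 := congrArg (fun p => p.1) this
  have e1 := congrArg (fun p => p.2.1) this
  have e2 := congrArg (fun p => p.2.2) this
  simp at e0 e1 e2
  simp [e0, e1, e2]
  exact hB.symm
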